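-- pv_equiv track=rewrite | github.com/tommyjanna/modelling-project-10 | run.py | find_n_maxes
-- ===== SOURCE A (Python) =====
-- def find_n_maxes(n, values):
--     """
--     NOTE: Pass values by VALUE!
--     Returns indices of the n max values from a list.
--     If more than n values have the same value, return those as well.
--     """
--
--     sorted_values = sorted(values)
--
--     greatest_indices = []
--     for i in range(n):
--         found_index = 0
--         for j in range(len(values)):
--             if sorted_values[-1 - i] == values[j] and j not in greatest_indices:
--                 greatest_indices.append(j)
--
--
--     return greatest_indices
-- ===== SOURCE B (Python) =====
-- def find_n_maxes(n, values):
--     if n <= 0 or not values: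
--         return []
--     indices_by_value = {}
--     for i, v in enumerate(values):
--         indices_by_value.setdefault(v, []).append(i)
--     threshold = sorted(values)[-n]
--     result = []
--     for v in sorted(indices_by_value, reverse=True):
--         if v >= threshold:
--             result.extend(indices_by_value[v])
--     return result
-- ===== Notes on version B (the rewrite author's own statement) =====
-- stated objective: faster
-- what changed: Instead of A's n passes over the whole list with a linear 'not in result' membership test, B builds a value->indices dict in one enumerate pass, computes the n-th-largest threshold from one sort, and emits the index groups of the distinct keys >= threshold in descending key order.
import Mathlib
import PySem

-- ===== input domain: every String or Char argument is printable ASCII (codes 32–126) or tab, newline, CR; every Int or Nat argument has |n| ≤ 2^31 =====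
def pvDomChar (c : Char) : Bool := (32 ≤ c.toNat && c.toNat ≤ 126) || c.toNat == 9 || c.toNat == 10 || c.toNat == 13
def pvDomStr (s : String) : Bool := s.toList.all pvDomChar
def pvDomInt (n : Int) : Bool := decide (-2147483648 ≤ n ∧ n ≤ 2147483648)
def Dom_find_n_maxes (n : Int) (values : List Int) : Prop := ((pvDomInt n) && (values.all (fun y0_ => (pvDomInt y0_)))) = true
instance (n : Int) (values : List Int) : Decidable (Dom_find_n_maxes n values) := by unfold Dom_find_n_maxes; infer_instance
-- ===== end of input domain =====

-- B replaces A's n full-list passes with a linear membership test by one value->indices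
-- dict pass plus a sort, emitting distinct keys >= the n-th-largest value in descending order (faster).


-- ===== PORT A =====
-- (A's `found_index = 0` is dead code and is not ported.)
def find_n_maxes (n : Int) (values : List Int) : List Int :=
  let sorted_values := PySem.List.sorted values (fun x => x) false
  (PySem.List.pyRange 0 n 1).foldl (fun greatest_indices i =>
    (PySem.List.pyRange 0 (PySem.List.len values) 1).foldl (fun acc j =>
      if PySem.List.pyGetD sorted_values (-1 - i) 0 = PySem.List.pyGetD values j 0 ∧ j ∉ acc
      then acc ++ [j] else acc) greatest_indices) []

-- ===== PORT B =====
def find_n_maxes_alt (n : Int) (values : List Int) : List Int :=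
  if n ≤ 0 ∨ values = [] then []
  else
    let d := (PySem.List.enumerate values 0).foldl
      (fun d p => d.modify p.2 ([] : List Int) (· ++ [p.1])) PySem.Dict.empty
    let threshold := PySem.List.pyGetD (PySem.List.sorted values (fun x => x) false) (-n) 0
    (PySem.List.sorted (PySem.Dict.keys d) (fun x => x) true).foldl
      (fun result v => if threshold ≤ v then result ++ d.getD v [] else result) []

-- ===== PRECONDITION & SPEC =====
-- Pre_ excludes exactly the inputs on which A raises: nonempty values with n > len(values)
-- (sorted_values[-1-i] is then out of range); on empty values the indexing sits inside the
-- never-entered inner loop, so A returns [] and those inputs stay inside Pre_.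
def Pre_find_n_maxes (n : Int) (values : List Int) : Prop :=
  values = [] ∨ n ≤ (values.length : Int)
instance (n : Int) (values : List Int) : Decidable (Pre_find_n_maxes n values) := by unfold Pre_find_n_maxes; infer_instance
def pvWitness_find_n_maxes : Int × List Int := (2, [5, 3, 5, 3])

def Spec_find_n_maxes (n : Int) (values : List Int) (out : List Int) : Prop := out = find_n_maxes_alt n values
instance (n : Int) (values : List Int) (out : List Int) : Decidable (Spec_find_n_maxes n values out) := by unfold Spec_find_n_maxes; infer_instance

-- ===== CLAIM (what is proved, stated in full; the proofs are below) =====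
def Claim_equal_find_n_maxes : Prop := ∀ (n : Int) (values : List Int), Dom_find_n_maxes n values → Pre_find_n_maxes n values → Spec_find_n_maxes n values (find_n_maxes n values)

-- ===== LEMMAS AND PROOFS =====

-- the list of indices (ascending) holding value v
def pvIdx (values : List Int) (v : Int) : List Int :=
  ((PySem.List.enumerate values 0).filter (fun p => p.2 == v)).map (·.1)

-- the descending sorted copy of values
def pvR (values : List Int) : List Int := (PySem.List.sorted values (fun x => x) false).reverse

-- the common specification: index groups of the distinct values of P, in P's order
def pvS (values : List Int) (P : List Int) : List Int :=
  (PySem.Set.ofList P).flatMap (pvIdx values)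


theorem pv_ofList_sublist {α : Type} [BEq α] [LawfulBEq α] (xs : List α) :
    (PySem.Set.ofList xs).Sublist xs := by
  induction xs using List.reverseRecOn with
  | nil => simp [PySem.Set.ofList]
  | append_singleton xs x ih =>
    rw [PySem.Set.ofList_append_singleton, PySem.Set.add_eq_ite]
    split
    · exact ih.trans (List.sublist_append_left _ _)
    · exact List.Sublist.append ih (List.Sublist.refl _)

theorem pv_strictDesc_ext (l₁ l₂ : List Int) (h₁ : l₁.Pairwise (· > ·)) (h₂ : l₂.Pairwise (· > ·))
    (h : ∀ x, x ∈ l₁ ↔ x ∈ l₂) : l₁ = l₂ := by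
  have nd₁ : l₁.Nodup := h₁.imp ne_of_gt
  have nd₂ : l₂.Nodup := h₂.imp ne_of_gt
  exact ((List.perm_ext_iff_of_nodup nd₁ nd₂).mpr h).eq_of_pairwise (fun a b _ _ h1 h2 => le_antisymm (le_of_lt h2) (le_of_lt h1)) h₁ h₂

theorem pv_inner (values : List Int) (v : Int) : ∀ (l acc : List Int), l.Nodup →
    l.foldl (fun acc j => if v = PySem.List.pyGetD values j 0 ∧ j ∉ acc then acc ++ [j] else acc) acc
      = acc ++ l.filter (fun j => decide (v = PySem.List.pyGetD values j 0 ∧ j ∉ acc)) := by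
  intro l
  induction l with
  | nil => intro acc _; simp
  | cons a l ih =>
    intro acc hnd
    have hal : a ∉ l := (List.nodup_cons.mp hnd).1
    have hnd' : l.Nodup := (List.nodup_cons.mp hnd).2
    by_cases hc : v = PySem.List.pyGetD values a 0 ∧ a ∉ acc
    · simp only [List.foldl_cons, if_pos hc, List.filter_cons, decide_eq_true hc]
      rw [ih (acc ++ [a]) hnd']
      have : l.filter (fun j => decide (v = PySem.List.pyGetD values j 0 ∧ j ∉ acc ++ [a]))
           = l.filter (fun j => decide (v = PySem.List.pyGetD values j 0 ∧ j ∉ acc)) := by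
        apply List.filter_congr
        intro j hj
        have : j ≠ a := fun e => hal (e ▸ hj)
        simp [List.mem_append, this]
      rw [this]
      simp
    · simp only [List.foldl_cons, if_neg hc, List.filter_cons, decide_eq_false hc]
      exact ih acc hnd'

theorem pv_mem_idx (values : List Int) (v j : Int) :
    j ∈ pvIdx values v ↔ ∃ k : Nat, k < values.length ∧ j = (k : Int) ∧ PySem.List.pyGetD values (k : Int) 0 = v := by
  unfold pvIdx
  simp only [List.mem_map, List.mem_filter, PySem.List.mem_enumerate_iff]
  constructor
  · rintro ⟨p, ⟨⟨k, hk, rfl⟩, hv⟩, rfl⟩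
    refine ⟨k, hk, by simp, ?_⟩
    simp only [beq_iff_eq] at hv
    simpa [PySem.List.pyGetD_natCast, List.getD_eq_getElem?_getD, hk] using hv
  · rintro ⟨k, hk, rfl, hv⟩
    refine ⟨((k : Int), values[k]), ⟨⟨k, hk, by simp⟩, ?_⟩, rfl⟩
    simp only [beq_iff_eq]
    simpa [PySem.List.pyGetD_natCast, List.getD_eq_getElem?_getD, hk] using hv

theorem pv_mem_S (values P : List Int) (j : Int) :
    j ∈ pvS values P ↔ ∃ k : Nat, k < values.length ∧ j = (k : Int) ∧ PySem.List.pyGetD values (k : Int) 0 ∈ P := by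
  unfold pvS
  simp only [List.mem_flatMap, PySem.Set.mem_ofList, pv_mem_idx]
  constructor
  · rintro ⟨v, hv, k, hk, rfl, hvk⟩
    exact ⟨k, hk, rfl, hvk ▸ hv⟩
  · rintro ⟨k, hk, rfl, hmem⟩
    exact ⟨_, hmem, k, hk, rfl, rfl⟩

theorem pv_idx_eq_filter_range (values : List Int) (v : Int) :
    pvIdx values v = (PySem.List.pyRange 0 (values.length : Int) 1).filter
      (fun j => decide (v = PySem.List.pyGetD values j 0)) := by
  unfold pvIdx
  rw [PySem.List.enumerate_eq_map_pyRange (d := 0), List.filter_map, List.map_map]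
  simp only [PySem.List.len_eq]
  simp only [Function.comp_def]
  rw [List.map_id']
  apply List.filter_congr
  intro j _
  rw [Bool.eq_iff_iff, beq_iff_eq, decide_eq_true_iff]; exact eq_comm

theorem pv_outer (values : List Int) : ∀ (m : Nat), (m : Int) ≤ (values.length : Int) →
    (PySem.List.pyRange 0 (m : Int) 1).foldl (fun greatest_indices i =>
      (PySem.List.pyRange 0 (PySem.List.len values) 1).foldl (fun acc j =>
        if PySem.List.pyGetD (PySem.List.sorted values (fun x => x) false) (-1 - i) 0 = PySem.List.pyGetD values j 0 ∧ j ∉ acc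
        then acc ++ [j] else acc) greatest_indices) []
      = pvS values ((pvR values).take m) := by
  intro m
  induction m with
  | zero =>
    intro _
    rw [PySem.List.pyRange_one_eq_nil (b := ((0:Nat):Int)) (by norm_num), List.take_zero]
    rfl
  | succ m ih =>
    intro h
    have hm : m < values.length := by exact_mod_cast (by omega : (m : Int) < (values.length : Int))
    have hsvlen : (PySem.List.sorted values (fun x => x) false).length = values.length :=
      PySem.List.length_sorted ..
    have hRlen : (pvR values).length = values.length := by
      simp [pvR, hsvlen]
    have hmR : m < (pvR values).length := by omega
    have hcast : ((m + 1 : Nat) : Int) = (m : Int) + 1 := by push_cast; ring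
    rw [hcast, PySem.List.pyRange_one_succ_right (by positivity), List.foldl_append,
      ih (by omega)]
    simp only [List.foldl_cons, List.foldl_nil]
    -- the value examined at iteration m is (pvR values)[m]
    have hv : PySem.List.pyGetD (PySem.List.sorted values (fun x => x) false) (-1 - (m : Int)) 0
        = (pvR values)[m] := by
      have h1 : (-1 - (m : Int)) = -(((m + 1 : Nat) : Int)) := by push_cast; ring
      rw [h1, PySem.List.pyGetD_neg_natCast _ (m+1) 0 (by omega) (by omega)]
      simp only [pvR, List.getElem_reverse]
      congr 1
      omega
    rw [hv]
    -- take (m+1) splits off (pvR values)[m]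
    have htake : (pvR values).take (m + 1) = (pvR values).take m ++ [(pvR values)[m]] := by
      rw [List.take_add_one, List.getElem?_eq_getElem hmR]
      rfl
    rw [pv_inner values _ _ _ (PySem.List.nodup_pyRange_one ..)]
    by_cases hvmem : (pvR values)[m] ∈ (pvR values).take m
    · -- repeated value: nothing is appended, and the spec set does not grow
      have hfilter : (PySem.List.pyRange 0 (PySem.List.len values) 1).filter
          (fun j => decide ((pvR values)[m] = PySem.List.pyGetD values j 0 ∧ j ∉ pvS values ((pvR values).take m))) = [] := by
        rw [List.filter_eq_nil_iff]
        intro j hj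
        simp only [decide_eq_true_eq, not_and, not_not]
        intro hje
        have hjr : 0 ≤ j ∧ j < (values.length : Int) := by
          have := (PySem.List.mem_pyRange_one).mp hj
          simpa [PySem.List.len_eq] using this
        rw [pv_mem_S]
        refine ⟨j.toNat, by omega, by omega, ?_⟩
        have : ((j.toNat : Nat) : Int) = j := by omega
        rw [this, ← hje]
        exact hvmem
      rw [hfilter, List.append_nil, htake]
      have : PySem.Set.ofList ((pvR values).take m ++ [(pvR values)[m]])
          = PySem.Set.ofList ((pvR values).take m) := by
        rw [PySem.Set.ofList_append_singleton,
          PySem.Set.add_of_mem ((PySem.Set.mem_ofList _ _).mpr hvmem)]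
      simp only [pvS]
      rw [this]
    · -- new value: exactly its index list is appended
      have hfilter : (PySem.List.pyRange 0 (PySem.List.len values) 1).filter
          (fun j => decide ((pvR values)[m] = PySem.List.pyGetD values j 0 ∧ j ∉ pvS values ((pvR values).take m)))
          = pvIdx values ((pvR values)[m]) := by
        rw [pv_idx_eq_filter_range]
        simp only [PySem.List.len_eq]
        apply List.filter_congr
        intro j hj
        apply decide_eq_decide.mpr
        constructor
        · exact fun hc => hc.1
        · intro he
          refine ⟨he, fun hacc => ?_⟩
          rw [pv_mem_S] at hacc
          obtain ⟨k, hk, hjk, hkm⟩ := hacc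
          rw [← hjk, ← he] at hkm
          exact hvmem hkm
      rw [hfilter, htake]
      have : PySem.Set.ofList ((pvR values).take m ++ [(pvR values)[m]])
          = PySem.Set.ofList ((pvR values).take m) ++ [(pvR values)[m]] := by
        rw [PySem.Set.ofList_append_singleton,
          PySem.Set.add_of_not_mem (fun hc => hvmem ((PySem.Set.mem_ofList _ _).mp hc))]
      simp only [pvS]
      rw [this, List.flatMap_append, List.flatMap_singleton]

theorem pv_A_eq (n : Int) (values : List Int) (h : n ≤ (values.length : Int)) :
    find_n_maxes n values = pvS values ((pvR values).take n.toNat) := by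
  unfold find_n_maxes
  have hr : PySem.List.pyRange 0 n 1 = PySem.List.pyRange 0 ((n.toNat : Nat) : Int) 1 := by
    by_cases h0 : 0 ≤ n
    · congr 1
      omega
    · rw [PySem.List.pyRange_one_eq_nil (by omega),
        PySem.List.pyRange_one_eq_nil (by omega : ((n.toNat : Nat) : Int) ≤ 0)]
  rw [hr]
  exact pv_outer values n.toNat (by omega)

-- the dict built by B maps each value to its ascending index list
theorem pv_dict_getD (values : List Int) (v : Int) :
    ((PySem.List.enumerate values 0).foldl
      (fun d p => d.modify p.2 ([] : List Int) (· ++ [p.1])) PySem.Dict.empty).getD v []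
    = pvIdx values v := by
  have h := PySem.Dict.getD_foldl_modify_append
    ((PySem.List.enumerate values 0).map (fun p : Int × Int => (p.2, p.1))) PySem.Dict.empty v
  simp only [List.foldl_map] at h
  rw [h]
  simp only [PySem.Dict.getD_empty, List.nil_append, List.filter_map, List.map_map]
  rfl

-- the dict's keys are the distinct values, first occurrence first
theorem pv_dict_keys (values : List Int) :
    ((PySem.List.enumerate values 0).foldl
      (fun d p => d.modify p.2 ([] : List Int) (· ++ [p.1])) PySem.Dict.empty).keys
    = PySem.Set.ofList values := by
  rw [PySem.Dict.keys_foldl_modify_key (PySem.List.enumerate values 0) (fun p => p.2)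
    ([] : List Int) (fun _ p => (· ++ [p.1]))]
  rw [PySem.List.map_snd_enumerate]
  simp [PySem.Dict.keys, PySem.Dict.empty, PySem.Set.update_nil_left]

theorem pv_ofList_R_pairwise (values : List Int) :
    (PySem.Set.ofList (pvR values)).Pairwise (fun a b => b < a) := by
  have h1 : (pvR values).Pairwise (fun a b : Int => b ≤ a) := by
    rw [pvR, List.pairwise_reverse]
    exact PySem.List.sorted_pairwise values (fun x => x)
  have h2 := List.Pairwise.sublist (pv_ofList_sublist (pvR values)) h1
  have h3 : (PySem.Set.ofList (pvR values)).Pairwise (fun a b => a ≠ b) :=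
    PySem.Set.nodup_ofList _
  exact (h3.and h2).imp (fun ⟨hne, hle⟩ => lt_of_le_of_ne hle (Ne.symm hne))

theorem pv_sorted_keys (values : List Int) :
    PySem.List.sorted (PySem.Set.ofList values) (fun x => x) true
      = PySem.Set.ofList (pvR values) := by
  apply PySem.List.sorted_rev_eq_of_perm_of_pairwise_gt
  · apply (List.perm_ext_iff_of_nodup (PySem.Set.nodup_ofList _) (PySem.Set.nodup_ofList _)).mpr
    intro x
    rw [PySem.Set.mem_ofList, PySem.Set.mem_ofList, pvR, List.mem_reverse,
      PySem.List.mem_sorted]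
  · exact pv_ofList_R_pairwise values

theorem pv_filter_take (values : List Int) (m : Nat) (hm1 : 1 ≤ m)
    (hmR : m ≤ (pvR values).length) :
    (PySem.Set.ofList (pvR values)).filter
        (fun v => decide ((pvR values)[m-1]'(by omega) ≤ v))
      = PySem.Set.ofList ((pvR values).take m) := by
  have hRp : (pvR values).Pairwise (fun a b : Int => b ≤ a) := by
    rw [pvR, List.pairwise_reverse]
    exact PySem.List.sorted_pairwise values (fun x => x)
  apply pv_strictDesc_ext
  · exact List.Pairwise.sublist List.filter_sublist (pv_ofList_R_pairwise values)
  · have h2 := List.Pairwise.sublist (pv_ofList_sublist ((pvR values).take m))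
      (List.Pairwise.sublist (List.take_sublist m _) hRp)
    have h3 : (PySem.Set.ofList ((pvR values).take m)).Pairwise (fun a b => a ≠ b) :=
      PySem.Set.nodup_ofList _
    exact (h3.and h2).imp (fun ⟨hne, hle⟩ => lt_of_le_of_ne hle (Ne.symm hne))
  · intro x
    rw [List.mem_filter, PySem.Set.mem_ofList, PySem.Set.mem_ofList, decide_eq_true_iff]
    have hpg := List.pairwise_iff_getElem.mp hRp
    constructor
    · rintro ⟨hxR, hxt⟩
      obtain ⟨k, hk, rfl⟩ := List.mem_iff_getElem.mp hxR
      rw [List.mem_take_iff_getElem]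
      by_cases hkm : k < m
      · exact ⟨k, by omega, rfl⟩
      · have : (pvR values)[k] ≤ (pvR values)[m-1]'(by omega) :=
          hpg (m-1) k (by omega) hk (by omega)
        have hx : (pvR values)[k] = (pvR values)[m-1]'(by omega) := le_antisymm this hxt
        exact ⟨m-1, by omega, hx.symm⟩
    · intro hxt
      rw [List.mem_take_iff_getElem] at hxt
      obtain ⟨k, hk, rfl⟩ := hxt
      refine ⟨List.getElem_mem _, ?_⟩
      by_cases hkm : k = m - 1
      · subst hkm; rfl
      · exact hpg k (m-1) (by omega) (by omega) (by omega)

theorem pv_B_eq (n : Int) (values : List Int) (h0 : 0 < n) (hne : values ≠ [])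
    (h : n ≤ (values.length : Int)) :
    find_n_maxes_alt n values = pvS values ((pvR values).take n.toNat) := by
  simp only [find_n_maxes_alt]
  rw [if_neg (by simp only [not_or]; exact ⟨by omega, hne⟩)]
  have hsvlen : (PySem.List.sorted values (fun x => x) false).length = values.length :=
    PySem.List.length_sorted ..
  have hRlen : (pvR values).length = values.length := by simp [pvR, hsvlen]
  have hm1 : 1 ≤ n.toNat := by omega
  have hmR : n.toNat ≤ (pvR values).length := by omega
  -- the threshold is the n-th largest value
  have ht : PySem.List.pyGetD (PySem.List.sorted values (fun x => x) false) (-n) 0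
      = (pvR values)[n.toNat - 1]'(by omega) := by
    have h1 : (-n) = -((n.toNat : Nat) : Int) := by omega
    rw [h1, PySem.List.pyGetD_neg_natCast _ n.toNat 0 (by omega) (by omega)]
    simp only [pvR, List.getElem_reverse]
    congr 1
    omega
  rw [pv_dict_keys, pv_sorted_keys, ht]
  have hfun : (fun (result : List Int) v => if (pvR values)[n.toNat - 1]'(by omega) ≤ v
        then result ++ ((PySem.List.enumerate values 0).foldl
          (fun d p => d.modify p.2 ([] : List Int) (· ++ [p.1])) PySem.Dict.empty).getD v []
        else result)
      = (fun result v => if (pvR values)[n.toNat - 1]'(by omega) ≤ v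
        then result ++ pvIdx values v else result) := by
    funext result v
    rw [pv_dict_getD]
  rw [hfun, PySem.List.foldl_ite_eq_foldl_filter
      (fun v => (pvR values)[n.toNat - 1]'(by omega) ≤ v)
      (fun result v => result ++ pvIdx values v),
    PySem.List.foldl_append_eq_flatMap, List.nil_append,
    pv_filter_take values n.toNat hm1 hmR]
  rfl

-- on empty values the inner loop of A never runs, so A returns []
theorem pv_A_nil (n : Int) : find_n_maxes n [] = [] := by
  unfold find_n_maxes
  simp [PySem.List.len_eq]

-- ===== VERDICT (by name: the statement is the Claim_ definition above) =====
theorem find_n_maxes_spec : Claim_equal_find_n_maxes := by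
  intro n values _ hpre
  unfold Spec_find_n_maxes
  rcases hpre with hnil | hle
  · subst hnil
    rw [pv_A_nil]
    simp [find_n_maxes_alt]
  · by_cases h0 : n ≤ 0
    · have : n.toNat = 0 := by omega
      rw [pv_A_eq n values hle, this]
      simp [find_n_maxes_alt, h0, pvS, PySem.Set.ofList]
    · by_cases hne : values = []
      · subst hne
        rw [pv_A_nil]
        simp [find_n_maxes_alt]
      · rw [pv_A_eq n values hle, pv_B_eq n values (by omega) hne hle]
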